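-- pv_equiv track=rewrite | github.com/ShajahanAI/codewars | python/7 kyu/27.py | estimator
-- ===== SOURCE A (Python) =====
-- def estimator(obstacles, stamina):
--     consecutive_ones_count = 0
--     stamina_tracker = []
--     obstacles += [0] # so that the loop doesn't end abruptly
--     for obstacle in obstacles:
--         if obstacle == 1:
--             consecutive_ones_count += 1
--         elif consecutive_ones_count:
--             stamina_tracker.append(2 if consecutive_ones_count == 1 else (consecutive_ones_count - 1) * 5)
--             consecutive_ones_count = 0
--
--     return sum(stamina_tracker) <= stamina
-- ===== SOURCE B (Python) =====
-- def estimator(obstacles, stamina):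
--     # Closed-form over local patterns: a run of n ones costs (n-1)*5, plus 2 if n == 1,
--     # so total cost = 5*(#ones - #runs) + 2*(#singleton runs), counted by three
--     # independent passes over a zero-padded copy (no run-length state at all).
--     # (Return-value equivalence only: A appends 0 to the caller's list, B does not mutate it.)
--     padded = [0] + obstacles + [0]
--     ones = sum(1 for x in obstacles if x == 1)
--     runs = sum(1 for a, b in zip(padded, padded[1:]) if a != 1 and b == 1)
--     singles = sum(1 for a, b, c in zip(padded, padded[1:], padded[2:])
--                   if a != 1 and b == 1 and c != 1)
--     return 5 * (ones - runs) + 2 * singles <= stamina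
-- ===== Notes on version B (the rewrite author's own statement) =====
-- stated objective: alternative
-- what changed: A streams the list with a consecutive-ones counter, appends a sentinel 0 to the caller's list (mutating it) and sums a list of per-run costs; B uses the closed form cost = 5*(#ones - #runs) + 2*(#singleton runs) and obtains the three counts by independent zip passes over a zero-padded copy, with no run-length state (return-value equivalence only: B does not mutate the argument).
import Mathlib
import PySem

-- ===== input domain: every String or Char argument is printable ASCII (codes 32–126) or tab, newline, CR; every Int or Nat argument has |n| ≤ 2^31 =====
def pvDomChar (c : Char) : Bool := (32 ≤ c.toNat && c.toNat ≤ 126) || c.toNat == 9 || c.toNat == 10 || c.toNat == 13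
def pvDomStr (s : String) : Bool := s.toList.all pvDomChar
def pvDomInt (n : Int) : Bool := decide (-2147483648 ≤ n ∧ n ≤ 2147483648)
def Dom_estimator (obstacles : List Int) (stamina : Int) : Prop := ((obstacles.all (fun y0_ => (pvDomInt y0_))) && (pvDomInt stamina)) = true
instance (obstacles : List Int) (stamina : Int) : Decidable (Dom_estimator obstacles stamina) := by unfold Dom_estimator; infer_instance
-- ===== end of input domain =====

-- B replaces A's streaming run-length counter (with sentinel append and per-run cost list) by the
-- closed form 5*(#ones - #runs) + 2*(#singleton runs), counted by independent zip passes over a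
-- zero-padded copy; return-value equivalence only (A mutates the caller's list by appending 0).


-- ===== PORT A =====
-- one loop step: state = (consecutive_ones_count, stamina_tracker)
def estStepA (s : Int × List Int) (x : Int) : Int × List Int :=
  if x = 1 then (s.1 + 1, s.2)
  else if s.1 ≠ 0 then (0, s.2 ++ [if s.1 = 1 then 2 else (s.1 - 1) * 5])
  else s

def estimator (obstacles : List Int) (stamina : Int) : Bool :=
  let s := (obstacles ++ [0]).foldl estStepA (0, [])
  decide (s.2.sum ≤ stamina)

-- ===== PORT B =====
-- padded[1:] / padded[2:] are ported as List.drop 1 / List.drop 2 (exact for nonnegative starts);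
-- Python's zip truncates to the shortest list, exactly as List.zip does.
def estimator_alt (obstacles : List Int) (stamina : Int) : Bool :=
  let padded := [0] ++ obstacles ++ [0]
  let ones : Int := (obstacles.filter (fun x => x == 1)).length
  let runs : Int := ((padded.zip (padded.drop 1)).filter
      (fun p => !(p.1 == 1) && p.2 == 1)).length
  let singles : Int := ((padded.zip ((padded.drop 1).zip (padded.drop 2))).filter
      (fun t => !(t.1 == 1) && t.2.1 == 1 && !(t.2.2 == 1))).length
  decide (5 * (ones - runs) + 2 * singles ≤ stamina)

-- ===== PRECONDITION & SPEC =====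
def Spec_estimator (obstacles : List Int) (stamina : Int) (out : Bool) : Prop := out = estimator_alt obstacles stamina
instance (obstacles : List Int) (stamina : Int) (out : Bool) : Decidable (Spec_estimator obstacles stamina out) := by unfold Spec_estimator; infer_instance

-- ===== CLAIM (what is proved, stated in full; the proofs are below) =====
def Claim_equal_estimator : Prop := ∀ (obstacles : List Int) (stamina : Int), Dom_estimator obstacles stamina → Spec_estimator obstacles stamina (estimator obstacles stamina)

-- ===== LEMMAS AND PROOFS =====

-- payout of an open run of c ones at a run boundary (0 if there is no open run)
def pay (c : Int) : Int := if c ≠ 0 then (if c = 1 then 2 else (c - 1) * 5) else 0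

-- reference recursion for A: cost of the runs in (replicate c ones ++ l)
def g : Int → List Int → Int
  | c, [] => pay c
  | c, x :: xs => if x = 1 then g (c + 1) xs else pay c + g 0 xs

-- reference recursion for B: per-element contribution given the previous element p
-- (a 1 contributes 5, minus 5 refunded at a run start, plus 2 if that run is a singleton)
def h : Int → List Int → Int
  | _, [] => 0
  | p, x :: xs =>
      (if x = 1 then
        (5 - (if p = 1 then 0 else 5))
          + (if p ≠ 1 ∧ (xs.headD 0) ≠ 1 then 2 else 0)
      else 0) + h x xs

theorem foldA_sum (l : List Int) : ∀ (c : Int) (acc : List Int),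
    ((l ++ [0]).foldl estStepA (c, acc)).2.sum = acc.sum + g c l := by
  induction l with
  | nil =>
    intro c acc
    simp only [List.nil_append, List.foldl_cons, List.foldl_nil, estStepA, g, pay]
    by_cases hc : c = 0 <;> simp [hc]
  | cons x xs ih =>
    intro c acc
    simp only [List.cons_append, List.foldl_cons, estStepA]
    by_cases hx : x = 1
    · rw [if_pos hx, ih]
      simp [g, hx]
    · rw [if_neg hx]
      by_cases hc : c = 0
      · simp only [hc, ne_eq, not_true_eq_false, if_false]
        rw [ih]
        simp [g, hx, pay]
      · simp only [ne_eq, hc, not_false_eq_true, if_true]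
        rw [ih]
        simp [g, hx, pay, hc, List.sum_append]
        split_ifs <;> ring

-- h only looks at the previous element through "= 1"
theorem h_congr (p q : Int) (l : List Int) (hp : p ≠ 1) (hq : q ≠ 1) :
    h p l = h q l := by
  cases l with
  | nil => rfl
  | cons x xs => simp [h, hp, hq]

-- bridge between the two reference recursions
theorem g_eq_h (l : List Int) : ∀ (c : Int), 0 ≤ c →
    g c l = (if 1 ≤ c then 5 * (c - 1) + (if c = 1 ∧ l.head? ≠ some 1 then 2 else 0) else 0)
              + h (if 1 ≤ c then 1 else 0) l := by
  induction l with
  | nil =>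
    intro c hc
    by_cases h1 : 1 ≤ c
    · simp only [g, pay, h, List.head?_nil]
      have hne : c ≠ 0 := by omega
      simp only [ne_eq, hne, not_false_eq_true, if_true, if_pos h1]
      by_cases hc1 : c = 1 <;> simp [hc1] <;> ring
    · have : c = 0 := by omega
      simp [this, g, pay, h]
  | cons x xs ih =>
    intro c hc
    have hz1 : (if (1:Int) ≤ 0 then (1:Int) else 0) = 0 := if_neg (by omega)
    by_cases hx : x = 1
    · subst hx
      by_cases h1 : 1 ≤ c
      · rw [g, if_pos rfl, ih (c + 1) (by omega)]
        have e1 : h 1 (1 :: xs) = 5 + h 1 xs := by simp [h]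
        have ha : (if (1:Int) ≤ c + 1 then (1:Int) else 0) = 1 := if_pos (by omega)
        have hb : (if (1:Int) ≤ c then (1:Int) else 0) = 1 := if_pos h1
        have hc1 : (if c + 1 = 1 ∧ xs.head? ≠ some 1 then (2:Int) else 0) = 0 :=
          if_neg (by rintro ⟨h2, -⟩; omega)
        have hc2 : (if c = 1 ∧ ((1:Int) :: xs).head? ≠ some 1 then (2:Int) else 0) = 0 :=
          if_neg (by rintro ⟨-, h2⟩; simp at h2)
        rw [ha, hb, e1, if_pos (by omega : (1:Int) ≤ c + 1), if_pos h1, hc1, hc2]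
        ring
      · have hc0 : c = 0 := by omega
        subst hc0
        have z : (0:Int) + 1 = 1 := by norm_num
        rw [g, if_pos rfl, z, ih 1 (by omega)]
        have e1 : h 0 (1 :: xs) = (if (xs.headD 0) ≠ 1 then 2 else 0) + h 1 xs := by
          norm_num [h]
        have ha : (if (1:Int) ≤ 1 then (1:Int) else 0) = 1 := if_pos (le_refl 1)
        have e2 : (if (1:Int) = 1 ∧ xs.head? ≠ some 1 then (2:Int) else 0)
            = (if (xs.headD 0) ≠ 1 then 2 else 0) := by
          cases xs <;> simp
        rw [ha, hz1, if_pos (le_refl (1:Int)), if_neg (by omega : ¬ (1:Int) ≤ 0), e1, e2]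
        ring
    · rw [g, if_neg hx]
      by_cases h1 : 1 ≤ c
      · rw [ih 0 (le_refl 0), hz1, if_neg (by omega : ¬ (1:Int) ≤ 0), if_pos h1]
        have hb : (if (1:Int) ≤ c then (1:Int) else 0) = 1 := if_pos h1
        rw [hb]
        have e1 : h 1 (x :: xs) = h x xs := by simp [h, hx]
        have e2 : h x xs = h 0 xs := h_congr x 0 xs hx (by norm_num)
        rw [e1, e2, zero_add]
        have e3 : (if c = 1 ∧ (x :: xs).head? ≠ some 1 then (2:Int) else 0)
            = (if c = 1 then 2 else 0) := by
          by_cases hc1 : c = 1 <;> simp [hc1, hx]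
        rw [e3]
        unfold pay
        rw [if_pos (by omega : c ≠ 0)]
        by_cases hc1 : c = 1
        · simp [hc1]
        · rw [if_neg hc1, if_neg hc1]
          ring
      · have hc0 : c = 0 := by omega
        subst hc0
        rw [ih 0 (le_refl 0), hz1, if_neg (by omega : ¬ (1:Int) ≤ 0), if_neg (by omega : ¬ (1:Int) ≤ 0)]
        have e1 : h 0 (x :: xs) = h x xs := by simp [h, hx]
        rw [e1, h_congr x 0 xs hx (by norm_num)]
        simp [pay]

-- B's three zip/filter counts combine to h p l (stated with a general first pad p)
theorem counts_eq_h (l : List Int) : ∀ (p : Int),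
    5 * (((l.filter (fun x => x == 1)).length : Int)
          - (((p :: (l ++ [0])).zip ((l ++ [0]))).filter
              (fun q => !(q.1 == 1) && q.2 == 1)).length)
      + 2 * ((((p :: (l ++ [0])).zip ((l ++ [0]).zip (l ++ [0]).tail)).filter
              (fun t => !(t.1 == 1) && t.2.1 == 1 && !(t.2.2 == 1))).length : Int)
    = h p l := by
  induction l with
  | nil =>
    intro p
    by_cases hp : p = 1 <;> simp [h, hp]
  | cons x xs ih =>
    intro p
    have hzip : ((x :: (xs ++ [0])).zip (xs ++ [0]))
        = (x, xs.headD 0) :: ((xs ++ [0]).zip (xs ++ [0]).tail) := by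
      cases xs <;> simp
    simp only [List.cons_append, List.tail_cons]
    rw [hzip]
    simp only [List.zip_cons_cons, List.filter_cons]
    by_cases hx : x = 1
    · subst hx
      by_cases hp : p = 1
      · subst hp
        have e : h 1 ((1:Int) :: xs) = 5 + h 1 xs := by simp [h]
        rw [e, ← ih 1]
        norm_num
        push_cast
        ring
      · have hp' : ((p : Int) == 1) = false := by simpa using hp
        by_cases hn : xs.headD 0 = 1
        · have hn' : ((xs.headD 0) == (1:Int)) = true := by simpa using hn
          have e : h p ((1:Int) :: xs) = 0 + h 1 xs := by
            simp [h, hp, ← List.headD_eq_head?_getD, hn]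
          rw [e, ← ih 1]
          simp only [hp', hn', Bool.not_false, Bool.true_and, beq_self_eq_true, Bool.and_true,
            Bool.not_true, Bool.and_false, if_true, if_false, List.length_cons]
          push_cast
          ring
        · have hn' : ((xs.headD 0) == (1:Int)) = false := by simpa using hn
          have e : h p ((1:Int) :: xs) = 2 + h 1 xs := by
            simp [h, hp, ← List.headD_eq_head?_getD, hn]
          rw [e, ← ih 1]
          simp only [hp', hn', Bool.not_false, Bool.true_and, beq_self_eq_true, Bool.and_true,
            if_true, List.length_cons]
          push_cast
          ring
    · have hx' : ((x:Int) == 1) = false := by simpa using hx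
      have e : h p (x :: xs) = 0 + h x xs := by simp [h, hx]
      rw [e, ← ih x]
      simp only [hx', Bool.and_false, Bool.false_and, Bool.not_eq_true', if_false]
      push_cast
      ring

-- ===== VERDICT (by name: the statement is the Claim_ definition above) =====
theorem estimator_spec : Claim_equal_estimator := by
  intro obstacles stamina _
  unfold Spec_estimator estimator estimator_alt
  have hA := foldA_sum obstacles 0 []
  simp only [List.sum_nil, zero_add] at hA
  have hB := counts_eq_h obstacles 0
  have hG := g_eq_h obstacles 0 (le_refl 0)
  simp only [if_neg (by omega : ¬ (1:Int) ≤ 0), zero_add] at hG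
  simp only [List.singleton_append, List.cons_append, List.nil_append, List.drop_succ_cons, List.drop_zero,
    List.drop_one, List.tail_cons] at hB ⊢
  rw [hA, hG, ← hB]
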